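-- pv_equiv track=rewrite | github.com/yoshiwatanabe/agent-patterns | skill_executor.py | detect_child_skills
-- ===== SOURCE A (Python) =====
-- from typing import List, Dict, Any
--
-- def detect_child_skills(request: str) -> List[str]:
--     """Detect which child skills should be invoked based on request"""
--     request_lower = request.lower()
--     children = []
--
--     # Keyword mapping
--     if any(w in request_lower for w in ["grammar", "spelling", "punctuation", "correct", "proofread"]):
--         children.append("grammar-checker")
--
--     if any(w in request_lower for w in ["sentiment", "tone", "emotional", "mood", "psychology"]):
--         children.append("sentiment-analyzer")
--
--     if any(w in request_lower for w in ["readability", "complex", "simple", "easy", "difficult"]):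
--         children.append("readability-scorer")
--
--     if any(w in request_lower for w in ["seo", "search", "keyword", "optimize", "marketing"]):
--         children.append("seo-optimizer")
--
--     # If comprehensive request, include all
--     if any(w in request_lower for w in ["comprehensive", "everything", "full", "complete", "all", "analyze", "evaluate"]):
--         children = ["grammar-checker", "sentiment-analyzer", "readability-scorer", "seo-optimizer"]
--
--     # Default to all if vague
--     if not children:
--         children = ["grammar-checker", "sentiment-analyzer", "readability-scorer", "seo-optimizer"]
--
--     return list(set(children))  # Remove duplicates
-- ===== SOURCE B (Python) =====
-- from typing import List
--
-- ALL_SKILLS = ["grammar-checker", "sentiment-analyzer", "readability-scorer", "seo-optimizer"]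
--
-- # Inverted index: each trigger keyword maps to the skill it activates;
-- # "*" marks a comprehensive keyword that activates every skill.
-- KEYWORD_TO_SKILL = {
--     "grammar": "grammar-checker", "spelling": "grammar-checker",
--     "punctuation": "grammar-checker", "correct": "grammar-checker",
--     "proofread": "grammar-checker",
--     "sentiment": "sentiment-analyzer", "tone": "sentiment-analyzer",
--     "emotional": "sentiment-analyzer", "mood": "sentiment-analyzer",
--     "psychology": "sentiment-analyzer",
--     "readability": "readability-scorer", "complex": "readability-scorer",
--     "simple": "readability-scorer", "easy": "readability-scorer",
--     "difficult": "readability-scorer",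
--     "seo": "seo-optimizer", "search": "seo-optimizer", "keyword": "seo-optimizer",
--     "optimize": "seo-optimizer", "marketing": "seo-optimizer",
--     "comprehensive": "*", "everything": "*", "full": "*", "complete": "*",
--     "all": "*", "analyze": "*", "evaluate": "*",
-- }
--
-- def detect_child_skills(request: str) -> List[str]:
--     """Detect which child skills should be invoked based on request"""
--     request_lower = request.lower()
--     hits = {skill for kw, skill in KEYWORD_TO_SKILL.items() if kw in request_lower}
--     if "*" in hits or not hits:
--         return list(ALL_SKILLS)
--     return [s for s in ALL_SKILLS if s in hits]
-- ===== Notes on version B (the rewrite author's own statement) =====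
-- stated objective: alternative
-- what changed: Replaces A's four per-skill any()-branches plus a separate comprehensive override by an inverted keyword-to-skill index: one flat scan over all 27 keywords collects a set of hit skills (comprehensive keywords map to a '*' sentinel meaning all), and the result is read off by filtering the canonical skill list against that set, so B returns a determinate order where A's list(set(...)) order is hash-seed dependent; outputs agree as sets.
import Mathlib
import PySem

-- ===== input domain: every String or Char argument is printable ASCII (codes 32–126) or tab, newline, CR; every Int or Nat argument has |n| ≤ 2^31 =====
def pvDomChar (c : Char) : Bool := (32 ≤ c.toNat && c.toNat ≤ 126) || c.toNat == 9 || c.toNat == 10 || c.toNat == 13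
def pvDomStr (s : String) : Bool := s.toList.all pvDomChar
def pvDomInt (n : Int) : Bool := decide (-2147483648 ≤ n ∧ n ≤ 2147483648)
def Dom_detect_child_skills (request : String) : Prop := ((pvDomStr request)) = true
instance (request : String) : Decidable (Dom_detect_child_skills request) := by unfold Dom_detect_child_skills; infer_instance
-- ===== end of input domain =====

-- B replaces A's four per-skill any() branches (plus a separate comprehensive override) by an
-- inverted keyword→skill index scanned once ("*" marks comprehensive keywords), reading the result
-- off by filtering the canonical skill list; outputs agree as sets (A's Python list(set(...)) order
-- is hash-seed dependent; both ports fix the same determinate order).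

-- ===== PORT A =====
def detect_child_skills (request : String) : List String :=
  let request_lower := PySem.Str.lower request
  let children : List String := []
  let children :=
    if (["grammar", "spelling", "punctuation", "correct", "proofread"].any
        (fun w => PySem.Str.isIn w request_lower)) then children ++ ["grammar-checker"] else children
  let children :=
    if (["sentiment", "tone", "emotional", "mood", "psychology"].any
        (fun w => PySem.Str.isIn w request_lower)) then children ++ ["sentiment-analyzer"] else children
  let children :=
    if (["readability", "complex", "simple", "easy", "difficult"].any
        (fun w => PySem.Str.isIn w request_lower)) then children ++ ["readability-scorer"] else children
  let children :=
    if (["seo", "search", "keyword", "optimize", "marketing"].any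
        (fun w => PySem.Str.isIn w request_lower)) then children ++ ["seo-optimizer"] else children
  let children :=
    if (["comprehensive", "everything", "full", "complete", "all", "analyze", "evaluate"].any
        (fun w => PySem.Str.isIn w request_lower)) then
      ["grammar-checker", "sentiment-analyzer", "readability-scorer", "seo-optimizer"]
    else children
  let children :=
    if children = [] then
      ["grammar-checker", "sentiment-analyzer", "readability-scorer", "seo-optimizer"]
    else children
  PySem.Set.ofList children

-- ===== PORT B =====
def pvAllSkills : List String :=
  ["grammar-checker", "sentiment-analyzer", "readability-scorer", "seo-optimizer"]

-- inverted index: keyword → skill it activates; "*" = comprehensive (activates every skill)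
def pvKeywordToSkill : List (String × String) :=
  [("grammar", "grammar-checker"), ("spelling", "grammar-checker"),
   ("punctuation", "grammar-checker"), ("correct", "grammar-checker"),
   ("proofread", "grammar-checker"),
   ("sentiment", "sentiment-analyzer"), ("tone", "sentiment-analyzer"),
   ("emotional", "sentiment-analyzer"), ("mood", "sentiment-analyzer"),
   ("psychology", "sentiment-analyzer"),
   ("readability", "readability-scorer"), ("complex", "readability-scorer"),
   ("simple", "readability-scorer"), ("easy", "readability-scorer"),
   ("difficult", "readability-scorer"),
   ("seo", "seo-optimizer"), ("search", "seo-optimizer"), ("keyword", "seo-optimizer"),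
   ("optimize", "seo-optimizer"), ("marketing", "seo-optimizer"),
   ("comprehensive", "*"), ("everything", "*"), ("full", "*"), ("complete", "*"),
   ("all", "*"), ("analyze", "*"), ("evaluate", "*")]

def detect_child_skills_alt (request : String) : List String :=
  let request_lower := PySem.Str.lower request
  let hits : PySem.Set String :=
    PySem.Set.ofList
      ((pvKeywordToSkill.filter (fun q => PySem.Str.isIn q.1 request_lower)).map Prod.snd)
  if PySem.Set.contains hits "*" || hits = [] then pvAllSkills
  else pvAllSkills.filter (fun s => PySem.Set.contains hits s)

-- ===== PRECONDITION & SPEC =====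
def Spec_detect_child_skills (request : String) (out : List String) : Prop := out = detect_child_skills_alt request
instance (request : String) (out : List String) : Decidable (Spec_detect_child_skills request out) := by unfold Spec_detect_child_skills; infer_instance

-- ===== CLAIM (what is proved, stated in full; the proofs are below) =====
def Claim_equal_detect_child_skills : Prop := ∀ (request : String), Dom_detect_child_skills request → Spec_detect_child_skills request (detect_child_skills request)

-- ===== LEMMAS AND PROOFS =====


def pvG1 : List String := ["grammar", "spelling", "punctuation", "correct", "proofread"]
def pvG2 : List String := ["sentiment", "tone", "emotional", "mood", "psychology"]
def pvG3 : List String := ["readability", "complex", "simple", "easy", "difficult"]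
def pvG4 : List String := ["seo", "search", "keyword", "optimize", "marketing"]
def pvGC : List String := ["comprehensive", "everything", "full", "complete", "all", "analyze", "evaluate"]

-- A's result as a function of the five group-test booleans
def pvCoreA (b1 b2 b3 b4 bc : Bool) : List String :=
  let children : List String := []
  let children := if b1 then children ++ ["grammar-checker"] else children
  let children := if b2 then children ++ ["sentiment-analyzer"] else children
  let children := if b3 then children ++ ["readability-scorer"] else children
  let children := if b4 then children ++ ["seo-optimizer"] else children
  let children :=
    if bc then ["grammar-checker", "sentiment-analyzer", "readability-scorer", "seo-optimizer"]
    else children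
  let children :=
    if children = [] then
      ["grammar-checker", "sentiment-analyzer", "readability-scorer", "seo-optimizer"]
    else children
  PySem.Set.ofList children

theorem pvA_eq (request : String) :
    detect_child_skills request =
      pvCoreA (pvG1.any (fun w => PySem.Str.isIn w (PySem.Str.lower request)))
        (pvG2.any (fun w => PySem.Str.isIn w (PySem.Str.lower request)))
        (pvG3.any (fun w => PySem.Str.isIn w (PySem.Str.lower request)))
        (pvG4.any (fun w => PySem.Str.isIn w (PySem.Str.lower request)))
        (pvGC.any (fun w => PySem.Str.isIn w (PySem.Str.lower request))) := rfl

-- B's result as a function of the keyword test p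
def pvCoreB (p : String → Bool) : List String :=
  let hits : PySem.Set String :=
    PySem.Set.ofList ((pvKeywordToSkill.filter (fun q => p q.1)).map Prod.snd)
  if PySem.Set.contains hits "*" || hits = [] then pvAllSkills
  else pvAllSkills.filter (fun s => PySem.Set.contains hits s)

theorem pvB_eq (request : String) :
    detect_child_skills_alt request = pvCoreB (fun w => PySem.Str.isIn w (PySem.Str.lower request)) := rfl

theorem pv_foldl_add_ne_nil {α : Type} [BEq α] (l : List α) (s : PySem.Set α) (h : s ≠ []) :
    l.foldl PySem.Set.add s ≠ [] := by
  induction l generalizing s with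
  | nil => exact h
  | cons a t ih =>
    simp only [List.foldl_cons]
    apply ih
    unfold PySem.Set.add
    split <;> simp_all

theorem pv_ofList_eq_nil {α : Type} [BEq α] (l : List α) :
    PySem.Set.ofList l = [] ↔ l = [] := by
  cases l with
  | nil => simp [PySem.Set.ofList, PySem.Set.empty]
  | cons a t =>
    constructor
    · intro h
      exfalso
      refine pv_foldl_add_ne_nil t (PySem.Set.add PySem.Set.empty a) ?_ h
      simp [PySem.Set.add, PySem.Set.empty, PySem.Set.contains]
    · intro h; cases h

theorem pv_contains_ofList {α : Type} [BEq α] [LawfulBEq α] (l : List α) (c : α) :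
    PySem.Set.contains (PySem.Set.ofList l) c = l.contains c := by
  simp [PySem.Set.contains, PySem.Set.mem_ofList]

theorem pv_core (p : String → Bool) :
    pvCoreA (pvG1.any p) (pvG2.any p) (pvG3.any p) (pvG4.any p) (pvGC.any p) = pvCoreB p := by
  unfold pvCoreB
  have hstar : PySem.Set.contains (PySem.Set.ofList ((pvKeywordToSkill.filter (fun q => p q.1)).map Prod.snd)) "*" = pvGC.any p := by
    rw [pv_contains_ofList, Bool.eq_iff_iff]
    simp [pvKeywordToSkill, pvGC, List.mem_filter]
  have hg1 : PySem.Set.contains (PySem.Set.ofList ((pvKeywordToSkill.filter (fun q => p q.1)).map Prod.snd)) "grammar-checker" = pvG1.any p := by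
    rw [pv_contains_ofList, Bool.eq_iff_iff]
    simp [pvKeywordToSkill, pvG1, List.mem_filter]
  have hg2 : PySem.Set.contains (PySem.Set.ofList ((pvKeywordToSkill.filter (fun q => p q.1)).map Prod.snd)) "sentiment-analyzer" = pvG2.any p := by
    rw [pv_contains_ofList, Bool.eq_iff_iff]
    simp [pvKeywordToSkill, pvG2, List.mem_filter]
  have hg3 : PySem.Set.contains (PySem.Set.ofList ((pvKeywordToSkill.filter (fun q => p q.1)).map Prod.snd)) "readability-scorer" = pvG3.any p := by
    rw [pv_contains_ofList, Bool.eq_iff_iff]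
    simp [pvKeywordToSkill, pvG3, List.mem_filter]
  have hg4 : PySem.Set.contains (PySem.Set.ofList ((pvKeywordToSkill.filter (fun q => p q.1)).map Prod.snd)) "seo-optimizer" = pvG4.any p := by
    rw [pv_contains_ofList, Bool.eq_iff_iff]
    simp [pvKeywordToSkill, pvG4, List.mem_filter]
  have hnil : (PySem.Set.ofList ((pvKeywordToSkill.filter (fun q => p q.1)).map Prod.snd) = []) ↔
      (pvG1.any p = false ∧ pvG2.any p = false ∧ pvG3.any p = false ∧ pvG4.any p = false ∧ pvGC.any p = false) := by
    rw [pv_ofList_eq_nil]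
    simp [pvKeywordToSkill, pvG1, pvG2, pvG3, pvG4, pvGC, List.filter_eq_nil_iff]
    tauto
  simp only [pvAllSkills, List.filter_cons, List.filter_nil, hstar, hg1, hg2, hg3, hg4, hnil]
  cases pvG1.any p <;> cases pvG2.any p <;> cases pvG3.any p <;>
    cases pvG4.any p <;> cases pvGC.any p <;> decide

theorem pv_main (request : String) :
    detect_child_skills request = detect_child_skills_alt request := by
  rw [pvA_eq, pvB_eq, pv_core]


-- ===== VERDICT (by name: the statement is the Claim_ definition above) =====
theorem detect_child_skills_spec : Claim_equal_detect_child_skills := by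
  intro request _
  exact pv_main request
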